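-- pv_equiv track=rewrite | github.com/Loth-Lorien/SiniestrosAPI | boletin_generator.py | _escapar_xml
-- ===== SOURCE A (Python) =====
-- def _escapar_xml(texto: str) -> str:
--     """
--     Escapar caracteres especiales para XML/SVG.
--
--     Args:
--         texto: Texto a escapar
--
--     Returns:
--         Texto escapado
--     """
--     if not texto:
--         return ""
--
--     replacements = {
--         '&': '&amp;',
--         '<': '&lt;',
--         '>': '&gt;',
--         '"': '&quot;',
--         "'": '&apos;'
--     }
--
--     resultado = texto
--     for char, escaped in replacements.items():
--         resultado = resultado.replace(char, escaped)
--
--     return resultado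
-- ===== SOURCE B (Python) =====
-- def _escapar_xml(texto: str) -> str:
--     """Escapar caracteres especiales para XML/SVG, un solo recorrido con acumulador."""
--     resultado = ""
--     for ch in texto:
--         if ch == '&':
--             resultado += '&amp;'
--         elif ch == '<':
--             resultado += '&lt;'
--         elif ch == '>':
--             resultado += '&gt;'
--         elif ch == '"':
--             resultado += '&quot;'
--         elif ch == "'":
--             resultado += '&apos;'
--         else:
--             resultado += ch
--     return resultado
-- ===== Notes on version B (the rewrite author's own statement) =====
-- stated objective: alternative
-- what changed: Replaces five sequential whole-string str.replace passes driven by a dict with a single left-to-right pass that appends the escape for each character via an explicit if/elif chain into a string accumulator (no dict, no replace).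
import Mathlib
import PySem

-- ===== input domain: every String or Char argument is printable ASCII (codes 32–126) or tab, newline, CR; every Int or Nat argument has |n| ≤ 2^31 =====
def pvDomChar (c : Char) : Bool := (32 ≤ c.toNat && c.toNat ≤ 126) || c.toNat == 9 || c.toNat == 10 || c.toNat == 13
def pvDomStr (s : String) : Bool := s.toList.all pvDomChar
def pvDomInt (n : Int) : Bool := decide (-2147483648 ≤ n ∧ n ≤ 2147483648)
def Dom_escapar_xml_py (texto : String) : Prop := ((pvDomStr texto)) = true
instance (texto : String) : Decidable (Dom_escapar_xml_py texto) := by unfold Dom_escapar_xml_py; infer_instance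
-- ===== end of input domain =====

-- B replaces A's five sequential whole-string replace passes (driven by a dict) with one
-- left-to-right pass appending each character's escape via an if/elif chain into an accumulator.

-- ===== PORT A =====
-- the dict literal of A, kept as a PySem.Dict; A iterates over its .items
def pvReplacements : PySem.Dict String String :=
  ⟨[("&", "&amp;"), ("<", "&lt;"), (">", "&gt;"), ("\"", "&quot;"), ("'", "&apos;")]⟩

def escapar_xml_py (texto : String) : String :=
  if texto.toList = [] then ""
  else
    -- for char, escaped in replacements.items(): resultado = resultado.replace(char, escaped)
    pvReplacements.items.foldl
      (fun resultado p => PySem.Str.replace resultado p.1 p.2) texto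

-- ===== PORT B =====
-- resultado = ""; for ch in texto: resultado += <escape of ch by if/elif chain>
def escapar_xml_py_alt (texto : String) : String :=
  texto.toList.foldl
    (fun resultado ch =>
      if ch = '&' then resultado ++ "&amp;"
      else if ch = '<' then resultado ++ "&lt;"
      else if ch = '>' then resultado ++ "&gt;"
      else if ch = '"' then resultado ++ "&quot;"
      else if ch = '\'' then resultado ++ "&apos;"
      else resultado.push ch) ""

-- ===== PRECONDITION & SPEC =====
def Spec_escapar_xml_py (texto : String) (out : String) : Prop := out = escapar_xml_py_alt texto
instance (texto : String) (out : String) : Decidable (Spec_escapar_xml_py texto out) := by unfold Spec_escapar_xml_py; infer_instance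

-- ===== CLAIM (what is proved, stated in full; the proofs are below) =====
def Claim_equal_escapar_xml_py : Prop := ∀ (texto : String), Dom_escapar_xml_py texto → Spec_escapar_xml_py texto (escapar_xml_py texto)

-- ===== LEMMAS AND PROOFS =====

-- replacing a SINGLE character is a per-character flatMap
theorem replace_go_single (c : Char) (ns : List Char) :
    ∀ (fuel : Nat) (l acc : List Char), l.length ≤ fuel →
      PySem.Chars.replace.go [c] ns fuel l acc
        = acc.reverse ++ l.flatMap (fun x => if x = c then ns else [x]) := by
  intro fuel
  induction fuel with
  | zero =>
    intro l acc h
    have : l = [] := List.eq_nil_of_length_eq_zero (Nat.le_zero.mp h)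
    subst this; simp [PySem.Chars.replace.go]
  | succ n ih =>
    intro l acc h
    cases l with
    | nil => simp [PySem.Chars.replace.go]
    | cons x t =>
      by_cases hx : x = c
      · subst hx
        have hpre : List.isPrefixOf [x] (x :: t) = true := by
          simp [List.isPrefixOf]
        simp only [PySem.Chars.replace.go, hpre, if_pos, List.length_cons,
          List.length_nil, Nat.zero_add, List.drop_succ_cons, List.drop_zero]
        rw [ih t (ns.reverse ++ acc) (by simpa using Nat.le_of_succ_le_succ h)]
        simp
      · have hpre' : List.isPrefixOf [c] (x :: t) = false := by
          simp [List.isPrefixOf]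
          intro hcx; exact hx hcx.symm
        simp only [PySem.Chars.replace.go, hpre', Bool.false_eq_true, if_false]
        rw [ih t (x :: acc) (by simpa using Nat.le_of_succ_le_succ h)]
        simp [hx]

theorem replace_single (c : Char) (ns s : List Char) :
    PySem.Chars.replace s [c] ns = s.flatMap (fun x => if x = c then ns else [x]) := by
  simp only [PySem.Chars.replace, List.isEmpty]
  exact replace_go_single c ns s.length s [] (le_refl _)

-- the per-character substitution of each of A's five passes
def pvF (c : Char) (ns : List Char) : Char → List Char := fun x => if x = c then ns else [x]

-- B's per-character substitution, as a list of chars (proof helper)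
def pvEsc (ch : Char) : List Char :=
  if ch = '&' then "&amp;".toList
  else if ch = '<' then "&lt;".toList
  else if ch = '>' then "&gt;".toList
  else if ch = '"' then "&quot;".toList
  else if ch = '\'' then "&apos;".toList
  else [ch]

-- A's composed five passes act on a single character exactly as B's if/elif chain
theorem chain_single (c : Char) :
    ((((pvF '&' "&amp;".toList c).flatMap (pvF '<' "&lt;".toList)).flatMap
        (pvF '>' "&gt;".toList)).flatMap (pvF '"' "&quot;".toList)).flatMap
      (pvF '\'' "&apos;".toList) = pvEsc c := by
  by_cases h1 : c = '&'
  · subst h1; decide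
  by_cases h2 : c = '<'
  · subst h2; decide
  by_cases h3 : c = '>'
  · subst h3; decide
  by_cases h4 : c = '"'
  · subst h4; decide
  by_cases h5 : c = '\''
  · subst h5; decide
  · simp [pvF, pvEsc, h1, h2, h3, h4, h5]

theorem chain_eq (l : List Char) :
    ((((l.flatMap (pvF '&' "&amp;".toList)).flatMap (pvF '<' "&lt;".toList)).flatMap
        (pvF '>' "&gt;".toList)).flatMap (pvF '"' "&quot;".toList)).flatMap
      (pvF '\'' "&apos;".toList) = l.flatMap pvEsc := by
  induction l with
  | nil => simp
  | cons c t ih =>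
    simp only [List.flatMap_cons, List.flatMap_append]
    rw [ih, chain_single]

-- B's fold builds acc ++ the flatMap of pvEsc
theorem alt_foldl_eq (l : List Char) :
    ∀ (acc : String),
      (l.foldl
        (fun resultado ch =>
          if ch = '&' then resultado ++ "&amp;"
          else if ch = '<' then resultado ++ "&lt;"
          else if ch = '>' then resultado ++ "&gt;"
          else if ch = '"' then resultado ++ "&quot;"
          else if ch = '\'' then resultado ++ "&apos;"
          else resultado.push ch) acc).toList
        = acc.toList ++ l.flatMap pvEsc := by
  induction l with
  | nil => intro acc; simp
  | cons c t ih =>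
    intro acc
    simp only [List.foldl_cons, List.flatMap_cons]
    rw [ih]
    by_cases h1 : c = '&'
    · simp [h1, pvEsc]
    by_cases h2 : c = '<'
    · simp [h2, pvEsc]
    by_cases h3 : c = '>'
    · simp [h3, pvEsc]
    by_cases h4 : c = '"'
    · simp [h4, pvEsc]
    by_cases h5 : c = '\''
    · simp [h5, pvEsc]
    · simp [h1, h2, h3, h4, h5, pvEsc]

-- ===== VERDICT (by name: the statement is the Claim_ definition above) =====
theorem escapar_xml_py_spec : Claim_equal_escapar_xml_py := by
  intro texto _
  unfold Spec_escapar_xml_py escapar_xml_py escapar_xml_py_alt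
  by_cases he : texto.toList = []
  · simp [he]
  · simp only [he, if_false]
    apply String.toList_inj.mp
    rw [alt_foldl_eq]
    simp only [pvReplacements, List.foldl, PySem.Str.toList_replace]
    rw [show "&".toList = ['&'] from rfl, show "<".toList = ['<'] from rfl,
      show ">".toList = ['>'] from rfl, show "\"".toList = ['"'] from rfl,
      show "'".toList = ['\''] from rfl]
    simp only [replace_single]
    have h := chain_eq texto.toList
    unfold pvF at h
    rw [h]
    simp
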